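-- pv_equiv track=rewrite | github.com/wonniebeastie/py110 | lesson_1/13_selection_and_transformation/odd_index_transformation.py | double_odd_index
-- ===== SOURCE A (Python) =====
-- def double_odd_index(numbers):
--     transformed_list = []
--
--     for num in range(len(numbers)):
--         current_num = numbers[num]
--
--         if num % 2 != 0:
--             transformed_list.append(current_num * 2)
--         else:
--             transformed_list.append(current_num)
--
--     return transformed_list
-- ===== SOURCE B (Python) =====
-- def double_odd_index(numbers):
--     result = list(numbers)
--     result[1::2] = [x * 2 for x in result[1::2]]
--     return result
-- ===== Notes on version B (the rewrite author's own statement) =====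
-- stated objective: idiomatic
-- what changed: B copies the list and reassigns the odd-index strided slice with a doubled comprehension, replacing A's index-by-index loop with a parity branch.
import Mathlib
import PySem

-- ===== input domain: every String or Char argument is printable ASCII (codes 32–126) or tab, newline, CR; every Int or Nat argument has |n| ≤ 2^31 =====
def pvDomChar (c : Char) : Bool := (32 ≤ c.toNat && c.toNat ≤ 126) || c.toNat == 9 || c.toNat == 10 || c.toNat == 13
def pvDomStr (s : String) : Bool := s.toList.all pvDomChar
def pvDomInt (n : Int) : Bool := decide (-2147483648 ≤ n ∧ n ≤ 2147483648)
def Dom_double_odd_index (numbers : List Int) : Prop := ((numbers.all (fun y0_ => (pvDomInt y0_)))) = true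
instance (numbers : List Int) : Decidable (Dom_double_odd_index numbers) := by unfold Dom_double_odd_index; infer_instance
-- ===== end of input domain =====

-- B copies the list and reassigns the odd-index strided slice with a doubled comprehension,
-- replacing A's index-by-index loop with a parity branch (idiomatic; same cost).

-- ===== PORT A =====
def double_odd_index (numbers : List Int) : List Int :=
  (PySem.List.pyRange 0 (numbers.length : Int) 1).foldl
    (fun transformed_list num =>
      let current_num := PySem.List.pyGetD numbers num 0
      if num % 2 ≠ 0 then transformed_list ++ [current_num * 2]
      else transformed_list ++ [current_num]) []

-- ===== PORT B =====
-- helper for B: result[1::2]  (elements at odd indices, in order)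
def pvOddSlice (xs : List Int) : List Int :=
  match xs with
  | [] => []
  | [_] => []
  | _ :: b :: t => b :: pvOddSlice t

-- helper for B: the strided slice assignment result[1::2] = ys
def pvSetOdd (xs ys : List Int) : List Int :=
  match xs, ys with
  | [], _ => []
  | [a], _ => [a]
  | a :: _ :: t, y :: ys' => a :: y :: pvSetOdd t ys'
  | a :: b :: t, [] => a :: b :: pvSetOdd t []

def double_odd_index_alt (numbers : List Int) : List Int :=
  let result := numbers
  pvSetOdd result ((pvOddSlice result).map (fun x => x * 2))

-- ===== PRECONDITION & SPEC =====
def Spec_double_odd_index (numbers : List Int) (out : List Int) : Prop := out = double_odd_index_alt numbers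
instance (numbers : List Int) (out : List Int) : Decidable (Spec_double_odd_index numbers out) := by unfold Spec_double_odd_index; infer_instance

-- ===== CLAIM (what is proved, stated in full; the proofs are below) =====
def Claim_equal_double_odd_index : Prop := ∀ (numbers : List Int), Dom_double_odd_index numbers → Spec_double_odd_index numbers (double_odd_index numbers)

-- ===== LEMMAS AND PROOFS =====
-- A's loop written as a map over the index range
def pvIdxF (xs : List Int) (k : Nat) : Int :=
  if ((k : Int)) % 2 ≠ 0 then xs.getD k 0 * 2 else xs.getD k 0

theorem double_odd_index_eq_map (xs : List Int) :
    double_odd_index xs = (List.range xs.length).map (pvIdxF xs) := by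
  have h : ∀ (l : List Nat) (acc : List Int),
      (List.map (fun (k : Nat) => (k : Int)) l).foldl
        (fun transformed_list num =>
          let current_num := PySem.List.pyGetD xs num 0
          if num % 2 ≠ 0 then transformed_list ++ [current_num * 2]
          else transformed_list ++ [current_num]) acc
      = acc ++ l.map (pvIdxF xs) := by
    intro l
    induction l with
    | nil => intro acc; simp
    | cons hd t ih =>
        intro acc
        simp only [List.map_cons, List.foldl_cons]
        rw [ih]
        by_cases hc : ((hd : Int)) % 2 = 0 <;>
          simp [pvIdxF, hc, PySem.List.pyGetD_natCast]
  unfold double_odd_index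
  rw [PySem.List.pyRange_zero_nat]
  show (List.map (fun (k : Nat) => (k : Int)) (List.range xs.length)).foldl
        (fun transformed_list num =>
          let current_num := PySem.List.pyGetD xs num 0
          if num % 2 ≠ 0 then transformed_list ++ [current_num * 2]
          else transformed_list ++ [current_num]) []
      = (List.range xs.length).map (pvIdxF xs)
  rw [h, List.nil_append]

theorem pvIdxF_shift (a b : Int) (t : List Int) (k : Nat) :
    pvIdxF (a :: b :: t) (k + 2) = pvIdxF t k := by
  unfold pvIdxF
  simp [List.getD]

theorem map_range_eq_alt (xs : List Int) :
    (List.range xs.length).map (pvIdxF xs) = double_odd_index_alt xs := by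
  induction xs using pvOddSlice.induct with
  | case1 => simp [double_odd_index_alt, pvSetOdd]
  | case2 a => simp [double_odd_index_alt, pvSetOdd, pvIdxF, List.getD]
  | case3 a b t ih =>
      have hlen : (a :: b :: t).length = t.length + 1 + 1 := by simp
      rw [hlen, List.range_succ_eq_map, List.range_succ_eq_map]
      simp only [List.map_cons, List.map_map, Function.comp_def]
      have hsh : ∀ k ∈ List.range t.length,
          pvIdxF (a :: b :: t) (Nat.succ (Nat.succ k)) = pvIdxF t k := by
        intro k _
        have h2 : Nat.succ (Nat.succ k) = k + 2 := by omega
        rw [h2, pvIdxF_shift]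
      have h0 : pvIdxF (a :: b :: t) 0 = a := by simp [pvIdxF, List.getD]
      have h1 : pvIdxF (a :: b :: t) (Nat.succ 0) = b * 2 := by
        norm_num [pvIdxF, List.getD]
      rw [List.map_congr_left hsh, h0, h1, ih]
      simp [double_odd_index_alt, pvOddSlice, pvSetOdd]

-- ===== VERDICT (by name: the statement is the Claim_ definition above) =====
theorem double_odd_index_spec : Claim_equal_double_odd_index := by
  intro numbers _
  unfold Spec_double_odd_index
  rw [double_odd_index_eq_map, map_range_eq_alt]
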